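-- pv_equiv track=rewrite | github.com/Team-A-Ka/A-ka_backend | app/services/transcript_chunking.py | _full_text_and_spans
-- ===== SOURCE A (Python) =====
-- from typing import TypedDict
--
-- class NormalizedSegment(TypedDict):
--     """청킹 전처리 후 한 줄 자막: 시작(ms), 본문."""
--
--     start_time: int
--     text: str
--
-- def _full_text_and_spans(
--     norm: list[NormalizedSegment],
-- ) -> tuple[str, list[tuple[int, int, int]]]:
--     """이어 붙인 전체 문자열과 각 줄의 문자 구간 ``[start, end)`` + ``norm`` 인덱스."""
--     spans: list[tuple[int, int, int]] = []
--     offset = 0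
--     for i, seg in enumerate(norm):
--         if i > 0:
--             offset += 1
--         s = offset
--         offset += len(seg["text"])
--         spans.append((s, offset, i))
--     full = " ".join(s["text"] for s in norm)
--     return full, spans
-- ===== SOURCE B (Python) =====
-- def _full_text_and_spans(norm):
--     texts = [seg["text"] for seg in norm]
--     lens = [len(t) for t in texts]
--     prefixes = [0]
--     for l in lens:
--         prefixes.append(prefixes[-1] + l)
--     spans = [(p + i, p + i + l, i) for i, (p, l) in enumerate(zip(prefixes, lens))]
--     return " ".join(texts), spans
-- ===== Notes on version B (the rewrite author's own statement) =====
-- stated objective: alternative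
-- what changed: Replaces A's single mutable-offset loop (offset threaded through an enumerate loop with an i>0 branch) by a table decomposition: extract texts, build a prefix-sum table of their lengths, then derive each span in closed form start_i = prefix_i + i, end_i = start_i + len_i in a separate comprehension.
import Mathlib
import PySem

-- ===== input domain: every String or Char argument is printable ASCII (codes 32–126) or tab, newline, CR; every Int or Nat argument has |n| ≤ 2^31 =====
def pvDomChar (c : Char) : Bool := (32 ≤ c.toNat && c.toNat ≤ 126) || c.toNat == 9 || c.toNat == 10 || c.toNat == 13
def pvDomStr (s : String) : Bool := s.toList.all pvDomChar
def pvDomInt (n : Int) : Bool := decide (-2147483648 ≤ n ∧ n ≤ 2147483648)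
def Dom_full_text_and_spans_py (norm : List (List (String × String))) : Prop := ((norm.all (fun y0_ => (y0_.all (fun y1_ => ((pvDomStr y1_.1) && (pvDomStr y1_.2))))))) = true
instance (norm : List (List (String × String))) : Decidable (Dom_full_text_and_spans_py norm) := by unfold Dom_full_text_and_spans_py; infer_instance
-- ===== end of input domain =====

-- B's structure differs from A's; the proof is about the RETURN value (neither program mutates its argument).

-- ===== PORT A =====
-- seg["text"] (KeyError when missing is excluded by Pre_; the default "" is never read inside Pre_)
def pvText (seg : List (String × String)) : String :=
  ((PySem.Dict.mk seg).get? "text").getD ""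

-- A's loop: 'for i, seg in enumerate(norm)' threading (spans, offset); spans.append = cons + recurse
def pvGoA (i : Nat) (offset : Int) : List (List (String × String)) → List (Int × Int × Int)
  | [] => []
  | seg :: rest =>
    let offset := if i > 0 then offset + 1 else offset
    let s := offset
    let offset := offset + PySem.Str.len (pvText seg)
    (s, offset, (i : Int)) :: pvGoA (i + 1) offset rest

def full_text_and_spans_py (norm : List (List (String × String))) : String × (List (Int × Int × Int)) :=
  let spans := pvGoA 0 0 norm
  let full := PySem.Str.join " " (norm.map pvText)
  (full, spans)

-- ===== PORT B =====
-- Source B's prefix loop: prefixes = [0]; for l in lens: prefixes.append(prefixes[-1] + l)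
def pvPrefixes (acc : Int) : List Int → List Int
  | [] => [acc]
  | l :: ls => acc :: pvPrefixes (acc + l) ls

def full_text_and_spans_py_alt (norm : List (List (String × String))) : String × (List (Int × Int × Int)) :=
  let texts := norm.map pvText
  let lens := texts.map PySem.Str.len
  let prefixes := pvPrefixes 0 lens
  let spans := (PySem.List.enumerate (prefixes.zip lens) 0).map
    (fun pr => (pr.2.1 + pr.1, pr.2.1 + pr.1 + pr.2.2, pr.1))
  (PySem.Str.join " " texts, spans)

-- ===== PRECONDITION & SPEC =====
-- Pre_ excludes exactly the segments without a "text" key, on which Python A raises KeyError.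
def Pre_full_text_and_spans_py (norm : List (List (String × String))) : Prop :=
  ∀ seg ∈ norm, (PySem.Dict.mk seg).contains "text" = true
instance (norm : List (List (String × String))) : Decidable (Pre_full_text_and_spans_py norm) := by unfold Pre_full_text_and_spans_py; infer_instance

def pvWitness_full_text_and_spans_py : (List (List (String × String))) :=
  [[("start_time", "0"), ("text", "hi")], [("text", "there")]]

def Spec_full_text_and_spans_py (norm : List (List (String × String))) (out : String × (List (Int × Int × Int))) : Prop := out = full_text_and_spans_py_alt norm
instance (norm : List (List (String × String))) (out : String × (List (Int × Int × Int))) : Decidable (Spec_full_text_and_spans_py norm out) := by unfold Spec_full_text_and_spans_py; infer_instance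

-- ===== CLAIM (what is proved, stated in full; the proofs are below) =====
def Claim_equal_full_text_and_spans_py : Prop := ∀ (norm : List (List (String × String))), Dom_full_text_and_spans_py norm → Pre_full_text_and_spans_py norm → Spec_full_text_and_spans_py norm (full_text_and_spans_py norm)

-- ===== LEMMAS AND PROOFS =====

-- common closed form: the span list generated from start index i0 and start offset off
def pvSpec (i0 : Int) (off : Int) : List Int → List (Int × Int × Int)
  | [] => []
  | l :: ls => (off, off + l, i0) :: pvSpec (i0 + 1) (off + l + 1) ls

-- A's loop at index i+1 (the i>0 branch always fires) matches the closed form shifted by the separator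
lemma pvGoA_succ (ts : List (List (String × String))) :
    ∀ (i : Nat) (off : Int),
      pvGoA (i + 1) off ts = pvSpec ((i : Int) + 1) (off + 1) (ts.map (fun s => PySem.Str.len (pvText s))) := by
  induction ts with
  | nil => intro i off; simp [pvGoA, pvSpec]
  | cons seg rest ih =>
    intro i off
    have h : i + 1 > 0 := Nat.succ_pos i
    simp only [pvGoA, List.map_cons, pvSpec, List.cons.injEq, h, if_true]
    refine ⟨by push_cast; ring_nf, ?_⟩
    rw [ih (i + 1)]
    push_cast
    ring_nf

lemma pvGoA_zero (ts : List (List (String × String))) :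
    pvGoA 0 0 ts = pvSpec 0 0 (ts.map (fun s => PySem.Str.len (pvText s))) := by
  cases ts with
  | nil => simp [pvGoA, pvSpec]
  | cons seg rest =>
    simp only [pvGoA, List.map_cons, pvSpec, List.cons.injEq]
    refine ⟨by norm_num, ?_⟩
    rw [pvGoA_succ rest 0]
    norm_num

-- B's enumerate-over-(prefix, len) comprehension matches the same closed form
lemma pvB_spec (lens : List Int) :
    ∀ (c : Int) (j0 : Int),
      (PySem.List.enumerate ((pvPrefixes c lens).zip lens) j0).map
        (fun pr => (pr.2.1 + pr.1, pr.2.1 + pr.1 + pr.2.2, pr.1))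
        = pvSpec j0 (c + j0) lens := by
  induction lens with
  | nil => intro c j0; simp [pvPrefixes, pvSpec, PySem.List.enumerate_nil]
  | cons l ls ih =>
    intro c j0
    simp only [pvPrefixes, List.zip_cons_cons, PySem.List.enumerate_cons, List.map_cons, pvSpec, List.cons.injEq]
    refine ⟨trivial, ?_⟩
    rw [ih (c + l) (j0 + 1)]
    ring_nf

-- ===== VERDICT (by name: the statement is the Claim_ definition above) =====
theorem full_text_and_spans_py_spec : Claim_equal_full_text_and_spans_py := by
  intro norm _ _
  unfold Spec_full_text_and_spans_py full_text_and_spans_py full_text_and_spans_py_alt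
  simp only
  rw [pvGoA_zero, List.map_map]
  simp only [Function.comp_def]
  rw [pvB_spec (norm.map (fun s => PySem.Str.len (pvText s))) 0 0]
  norm_num
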